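-- pv_equiv track=rewrite | github.com/darknight/algorithms | hackerrank/algorithms/a_algo_9/minimum_loss.py | minimumLoss
-- ===== SOURCE A (Python) =====
-- def minimumLoss(price):
--     index = range(len(price))
--     price_with_index = list(zip(price, index))
--     price_with_index.sort(key=lambda x: x[0])
--     min_loss = 10 ** 16
--     for i in range(len(price)-1):
--         # if price is lower but original index is larger
--         if price_with_index[i][1] > price_with_index[i+1][1]:
--             min_loss = min(min_loss, price_with_index[i+1][0] - price_with_index[i][0])
--
--     return min_loss
-- ===== SOURCE B (Python) =====
-- def minimumLoss(price):
--     # Direct pairwise scan: for each buy price p, compare with every later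
--     # sell price q; a valid loss is p - q when p > q. No sorting needed.
--     min_loss = 10 ** 16
--     rest = price
--     while rest:
--         p = rest[0]
--         rest = rest[1:]
--         for q in rest:
--             if p > q:
--                 min_loss = min(min_loss, p - q)
--     return min_loss
-- ===== Notes on version B (the rewrite author's own statement) =====
-- stated objective: simpler
-- what changed: Replaces sort-the-(price,index)-pairs-then-scan-adjacent-entries with a direct two-level scan over all (earlier, later) pairs, taking the minimum positive difference; no sorting and no index bookkeeping.
import Mathlib
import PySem

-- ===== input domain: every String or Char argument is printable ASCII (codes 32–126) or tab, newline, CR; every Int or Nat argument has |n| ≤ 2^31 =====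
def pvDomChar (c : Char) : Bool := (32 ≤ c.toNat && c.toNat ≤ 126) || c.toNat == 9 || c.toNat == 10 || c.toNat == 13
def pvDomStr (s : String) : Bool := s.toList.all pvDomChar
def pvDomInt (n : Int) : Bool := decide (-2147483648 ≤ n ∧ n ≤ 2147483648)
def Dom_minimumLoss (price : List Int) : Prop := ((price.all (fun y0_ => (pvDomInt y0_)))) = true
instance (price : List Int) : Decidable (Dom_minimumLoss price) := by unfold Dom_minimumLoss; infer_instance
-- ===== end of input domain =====

-- B replaces A's sort-the-(price,index)-pairs-then-scan-adjacent-entries with a direct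
-- scan over all (earlier, later) pairs; same return value, no side effects.

-- ===== PORT A =====
-- Python local `price_with_index` (zip with range(len), stable sort by price)
def pvPwi (price : List Int) : List (Int × Int) :=
  PySem.List.sorted (price.zip (PySem.List.pyRange 0 (price.length : Int) 1)) (fun x => x.1)

def minimumLoss (price : List Int) : Int :=
  (PySem.List.pyRange 0 ((price.length : Int) - 1) 1).foldl
    (fun min_loss i =>
      match PySem.List.pyGet? (pvPwi price) i, PySem.List.pyGet? (pvPwi price) (i + 1) with
      | some a, some b => if a.2 > b.2 then min min_loss (b.1 - a.1) else min_loss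
      | _, _ => min_loss) (10 ^ 16)

-- ===== PORT B =====
-- inner `for q in rest` loop
def pvAltInner (p : Int) (rest : List Int) (m : Int) : Int :=
  rest.foldl (fun acc q => if p > q then min acc (p - q) else acc) m

-- outer `while rest` loop peeling the head
def pvAltLoop : List Int → Int → Int
  | [], m => m
  | p :: rest, m => pvAltLoop rest (pvAltInner p rest m)

def minimumLoss_alt (price : List Int) : Int := pvAltLoop price (10 ^ 16)

-- ===== PRECONDITION & SPEC =====
def Spec_minimumLoss (price : List Int) (out : Int) : Prop := out = minimumLoss_alt price
instance (price : List Int) (out : Int) : Decidable (Spec_minimumLoss price out) := by unfold Spec_minimumLoss; infer_instance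

-- ===== CLAIM (what is proved, stated in full; the proofs are below) =====
def Claim_equal_minimumLoss : Prop := ∀ (price : List Int), Dom_minimumLoss price → Spec_minimumLoss price (minimumLoss price)

-- ===== LEMMAS AND PROOFS =====

-- Strict order realised by Python's stable sort on (price, distinct index) pairs
def pvLex (a b : Int × Int) : Prop := a.1 < b.1 ∨ (a.1 = b.1 ∧ a.2 < b.2)

-- candidates produced by A's adjacent scan of the sorted list
def pvPairs : List (Int × Int) → List Int
  | a :: b :: t => (if b.2 < a.2 then [b.1 - a.1] else []) ++ pvPairs (b :: t)
  | _ => []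

-- candidates produced by B's pairwise scan
def pvCands : List Int → List Int
  | [] => []
  | p :: rest => ((rest.filter (fun q => p > q)).map (fun q => p - q)) ++ pvCands rest

-- the per-index step of A's loop, in getElem? form
def pvG (s : List (Int × Int)) (k : Nat) (acc : Int) : Int :=
  match s[k]?, s[k+1]? with
  | some a, some b => if b.2 < a.2 then min acc (b.1 - a.1) else acc
  | _, _ => acc

lemma pv_foldl_congr {α β : Type} (l : List β) (f g : α → β → α) (a : α)
    (h : ∀ acc, ∀ x ∈ l, f acc x = g acc x) : l.foldl f a = l.foldl g a := by
  induction l generalizing a with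
  | nil => rfl
  | cons x t ih =>
    rw [List.foldl_cons, List.foldl_cons, h a x List.mem_cons_self]
    exact ih _ (fun acc y hy => h acc y (List.mem_cons_of_mem _ hy))

-- ----- fold-min toolbox -----
lemma pv_foldl_min_le_init (L : List Int) (m : Int) : L.foldl min m ≤ m := by
  induction L generalizing m with
  | nil => simp
  | cons x t ih => exact le_trans (ih (min m x)) (min_le_left _ _)

lemma pv_foldl_min_le_mem (L : List Int) (m x : Int) (hx : x ∈ L) : L.foldl min m ≤ x := by
  induction L generalizing m with
  | nil => simp at hx
  | cons y t ih =>
    rcases List.mem_cons.mp hx with h | h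
    · subst h; exact le_trans (pv_foldl_min_le_init t (min m x)) (min_le_right _ _)
    · exact ih (min m y) h

lemma pv_foldl_min_cases (L : List Int) (m : Int) : L.foldl min m = m ∨ L.foldl min m ∈ L := by
  induction L generalizing m with
  | nil => simp
  | cons y t ih =>
    rcases ih (min m y) with h | h
    · rcases min_cases m y with ⟨he, _⟩ | ⟨he, _⟩
      · left; rw [List.foldl_cons, h, he]
      · right; rw [List.foldl_cons, h, he]; exact List.mem_cons_self
    · right; exact List.mem_cons_of_mem _ h

lemma pv_foldl_min_eq (L1 L2 : List Int) (m : Int)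
    (h1 : ∀ v ∈ L1, ∃ w ∈ L2, w ≤ v) (h2 : ∀ w ∈ L2, ∃ v ∈ L1, v ≤ w) :
    L1.foldl min m = L2.foldl min m := by
  apply le_antisymm
  · rcases pv_foldl_min_cases L2 m with h | h
    · rw [h]; exact pv_foldl_min_le_init _ _
    · rcases h2 _ h with ⟨v, hv, hle⟩
      exact le_trans (pv_foldl_min_le_mem _ _ _ hv) hle
  · rcases pv_foldl_min_cases L1 m with h | h
    · rw [h]; exact pv_foldl_min_le_init _ _
    · rcases h1 _ h with ⟨w, hw, hle⟩
      exact le_trans (pv_foldl_min_le_mem _ _ _ hw) hle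

-- ----- B's loop computes foldl min over pvCands -----
lemma pv_inner_eq (p : Int) (rest : List Int) (m : Int) :
    pvAltInner p rest m = ((rest.filter (fun q => p > q)).map (fun q => p - q)).foldl min m := by
  induction rest generalizing m with
  | nil => rfl
  | cons q t ih =>
    by_cases h : p > q
    · simp only [pvAltInner, List.foldl_cons, List.filter_cons, h, decide_true, if_true, List.map_cons]
      simpa [pvAltInner] using ih (min m (p - q))
    · simp only [pvAltInner, List.foldl_cons, List.filter_cons, h, decide_false, if_false]
      simpa [pvAltInner] using ih m

lemma pv_altLoop_eq (l : List Int) (m : Int) :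
    pvAltLoop l m = (pvCands l).foldl min m := by
  induction l generalizing m with
  | nil => rfl
  | cons p rest ih =>
    rw [pvAltLoop, pv_inner_eq, pvCands, List.foldl_append]
    exact ih _

lemma pv_mem_cands (l : List Int) (v : Int) :
    v ∈ pvCands l ↔ ∃ i j : Nat, i < j ∧ ∃ p q, l[i]? = some p ∧ l[j]? = some q ∧ q < p ∧ v = p - q := by
  induction l with
  | nil => simp [pvCands]
  | cons a t ih =>
    constructor
    · intro hv
      rcases List.mem_append.mp hv with h | h
      · rcases List.mem_map.mp h with ⟨q, hq, rfl⟩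
        rcases List.mem_filter.mp hq with ⟨hqt, hlt⟩
        rcases List.mem_iff_getElem?.mp hqt with ⟨k, hk⟩
        exact ⟨0, k+1, by omega, a, q, by simp, by simpa using hk, by simpa using hlt, rfl⟩
      · rcases (ih).mp h with ⟨i, j, hij, p, q, hp, hq, hlt, rfl⟩
        exact ⟨i+1, j+1, by omega, p, q, by simpa using hp, by simpa using hq, hlt, rfl⟩
    · rintro ⟨i, j, hij, p, q, hp, hq, hlt, rfl⟩
      cases i with
      | zero =>
        simp at hp; subst hp
        apply List.mem_append.mpr; left
        apply List.mem_map.mpr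
        refine ⟨q, List.mem_filter.mpr ⟨?_, by simpa using hlt⟩, rfl⟩
        obtain ⟨k, hk⟩ : ∃ k, j = k + 1 := ⟨j - 1, by omega⟩
        subst hk; simp at hq
        exact List.mem_of_getElem? hq
      | succ i =>
        obtain ⟨k, hk⟩ : ∃ k, j = k + 1 := ⟨j - 1, by omega⟩
        subst hk
        apply List.mem_append.mpr; right
        exact (ih).mpr ⟨i, k, by omega, p, q, by simpa using hp, by simpa using hq, hlt, rfl⟩

lemma pv_mem_pairs (s : List (Int × Int)) (v : Int) :
    v ∈ pvPairs s ↔ ∃ (k : Nat) (a b : Int × Int),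
      s[k]? = some a ∧ s[k+1]? = some b ∧ b.2 < a.2 ∧ v = b.1 - a.1 := by
  induction s with
  | nil => simp [pvPairs]
  | cons a t ih =>
    cases t with
    | nil =>
      simp only [pvPairs]
      constructor
      · intro h; simp at h
      · rintro ⟨k, x, y, hx, hy, _, _⟩
        cases k with
        | zero => simp at hy
        | succ k => simp at hx
    | cons b t2 =>
      constructor
      · intro hv
        rcases List.mem_append.mp hv with h | h
        · by_cases hc : b.2 < a.2
          · simp only [hc, if_true, List.mem_singleton] at h
            exact ⟨0, a, b, by simp, by simp, hc, h⟩
          · simp [hc] at h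
        · rcases ih.mp h with ⟨k, x, y, hx, hy, hlt, rfl⟩
          exact ⟨k+1, x, y, by simpa using hx, by simpa using hy, hlt, rfl⟩
      · rintro ⟨k, x, y, hx, hy, hlt, rfl⟩
        cases k with
        | zero =>
          simp at hx hy; subst hx; subst hy
          apply List.mem_append.mpr; left; simp [hlt]
        | succ k =>
          apply List.mem_append.mpr; right
          exact ih.mpr ⟨k, x, y, by simpa using hx, by simpa using hy, hlt, rfl⟩

-- ----- A's loop computes foldl min over pvPairs -----
lemma pv_bridge_nat (s : List (Int × Int)) (m : Int) :
    (List.range (s.length - 1)).foldl (fun acc k => pvG s k acc) m = (pvPairs s).foldl min m := by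
  induction s generalizing m with
  | nil => rfl
  | cons a t ih =>
    cases t with
    | nil => rfl
    | cons b t2 =>
      have hlen : (a :: b :: t2).length - 1 = ((b :: t2).length - 1) + 1 := by simp
      rw [hlen, List.range_succ_eq_map, List.foldl_cons, List.foldl_map]
      have hstep : ∀ (acc : Int) (k : Nat), pvG (a :: b :: t2) (k+1) acc = pvG (b :: t2) k acc := by
        intro acc k; simp [pvG]
      have hg0 : pvG (a :: b :: t2) 0 m = if b.2 < a.2 then min m (b.1 - a.1) else m := by
        simp [pvG]
      calc (List.range ((b :: t2).length - 1)).foldl (fun acc k => pvG (a :: b :: t2) (k+1) acc) (pvG (a :: b :: t2) 0 m)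
          = (List.range ((b :: t2).length - 1)).foldl (fun acc k => pvG (b :: t2) k acc) (pvG (a :: b :: t2) 0 m) := by
            exact pv_foldl_congr _ _ _ _ (fun acc k _ => hstep acc k)
        _ = (pvPairs (b :: t2)).foldl min (pvG (a :: b :: t2) 0 m) := ih _
        _ = (pvPairs (a :: b :: t2)).foldl min m := by
            rw [hg0]; by_cases hc : b.2 < a.2 <;> simp [pvPairs, hc]

lemma pv_pwi_len (price : List Int) : (pvPwi price).length = price.length := by
  rw [pvPwi, PySem.List.length_sorted, List.length_zip, PySem.List.length_pyRange_one]
  omega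

lemma pv_A_eq (price : List Int) :
    minimumLoss price = (pvPairs (pvPwi price)).foldl min (10 ^ 16) := by
  unfold minimumLoss
  rw [PySem.List.pyRange_one]
  have htn : ((price.length : Int) - 1 - 0).toNat = (pvPwi price).length - 1 := by
    have := pv_pwi_len price; omega
  rw [htn, List.foldl_map]
  rw [← pv_bridge_nat (pvPwi price) (10 ^ 16)]
  apply pv_foldl_congr
  intro acc k _
  have h1 : PySem.List.pyGet? (pvPwi price) (0 + (k : Int)) = (pvPwi price)[k]? := by
    simp
  have h2 : PySem.List.pyGet? (pvPwi price) (0 + (k : Int) + 1) = (pvPwi price)[k+1]? := by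
    have he : (0 : Int) + (k : Int) + 1 = ((k + 1 : Nat) : Int) := by push_cast; ring
    rw [he]; exact PySem.List.pyGet?_natCast (pvPwi price) (k+1)
  simp only [h1, h2, pvG]


-- ----- stability of PySem's insertion sort -----
lemma pv_insertBy_pairwise (x : Int × Int) (acc : List (Int × Int))
    (h : acc.Pairwise pvLex) (hall : ∀ y ∈ acc, y.2 < x.2) :
    (PySem.List.insertBy (fun a b => decide (a.1 < b.1)) x acc).Pairwise pvLex := by
  induction acc with
  | nil => simp [PySem.List.insertBy]
  | cons y ys ih =>
    rw [PySem.List.insertBy]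
    by_cases hb : x.1 < y.1
    · simp only [hb, decide_true, if_true]
      constructor
      · intro z hz
        rcases List.mem_cons.mp hz with rfl | hz2
        · exact Or.inl hb
        · rcases List.rel_of_pairwise_cons h hz2 with h' | ⟨h1', _⟩
          · exact Or.inl (lt_trans hb h')
          · exact Or.inl (h1' ▸ hb)
      · exact h
    · simp only [hb, decide_false]
      rcases h with _ | ⟨hy, hys⟩
      constructor
      · intro z hz
        rcases (PySem.List.mem_insertBy _ _ _ _).mp hz with rfl | hz2
        · rcases lt_or_eq_of_le (not_lt.mp hb) with h' | h'
          · exact Or.inl h'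
          · exact Or.inr ⟨h', hall y List.mem_cons_self⟩
        · exact hy z hz2
      · exact ih hys (fun z hz => hall z (List.mem_cons_of_mem _ hz))

lemma pv_foldl_insertBy_pairwise : ∀ (xs acc : List (Int × Int)),
    acc.Pairwise pvLex → (∀ y ∈ acc, ∀ x ∈ xs, y.2 < x.2) →
    xs.Pairwise (fun a b => a.2 < b.2) →
    (xs.foldl (fun acc x => PySem.List.insertBy (fun a b => decide (a.1 < b.1)) x acc) acc).Pairwise pvLex := by
  intro xs
  induction xs with
  | nil => intro acc h _ _; simpa using h
  | cons x rest ih =>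
    intro acc h hall hxs
    rcases hxs with _ | ⟨hx, hrest⟩
    rw [List.foldl_cons]
    apply ih
    · exact pv_insertBy_pairwise x acc h (fun y hy => hall y hy x List.mem_cons_self)
    · intro y hy z hz
      rcases (PySem.List.mem_insertBy _ _ _ _).mp hy with rfl | hy2
      · exact hx z hz
      · exact hall y hy2 z (List.mem_cons_of_mem _ hz)
    · exact hrest

lemma pv_sorted_stable (xs : List (Int × Int)) (h : xs.Pairwise (fun a b => a.2 < b.2)) :
    (PySem.List.sorted xs (fun x => x.1)).Pairwise pvLex := by
  rw [PySem.List.sorted_eq_foldl_insertBy]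
  exact pv_foldl_insertBy_pairwise xs [] (by simp) (by simp) h

-- ----- facts about price.zip range(len(price)) -----
lemma pv_zip_getElem (price : List Int) (k : Nat)
    (hk : k < (price.zip (PySem.List.pyRange 0 (price.length : Int) 1)).length) :
    (price.zip (PySem.List.pyRange 0 (price.length : Int) 1))[k]
      = (price[k]'(by simpa using (List.lt_length_left_of_zip hk)), (k : Int)) := by
  rw [List.getElem_zip]
  have hk2 : k < (PySem.List.pyRange 0 (price.length : Int) 1).length :=
    List.lt_length_right_of_zip hk
  congr 1
  rw [PySem.List.getElem_pyRange_one]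
  omega

lemma pv_zip_snd_pairwise (price : List Int) :
    (price.zip (PySem.List.pyRange 0 (price.length : Int) 1)).Pairwise (fun a b => a.2 < b.2) := by
  apply List.pairwise_iff_getElem.mpr
  intro i j hi hj hij
  rw [pv_zip_getElem price i hi, pv_zip_getElem price j hj]
  show (i : Int) < (j : Int)
  exact_mod_cast hij

lemma pv_mem_zip (price : List Int) (z : Int × Int)
    (hz : z ∈ price.zip (PySem.List.pyRange 0 (price.length : Int) 1)) :
    ∃ k : Nat, price[k]? = some z.1 ∧ z.2 = (k : Int) := by
  rcases List.mem_iff_getElem.mp hz with ⟨k, hk, hzk⟩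
  rw [pv_zip_getElem price k hk] at hzk
  refine ⟨k, ?_, by rw [← hzk]⟩
  rw [← hzk]
  simp

lemma pv_zip_mem (price : List Int) (k : Nat) (p : Int) (hp : price[k]? = some p) :
    (p, (k : Int)) ∈ price.zip (PySem.List.pyRange 0 (price.length : Int) 1) := by
  have hk : k < price.length := (List.getElem?_eq_some_iff.mp hp).1
  have hpk : price[k] = p := (List.getElem?_eq_some_iff.mp hp).2
  have hklen : k < (price.zip (PySem.List.pyRange 0 (price.length : Int) 1)).length := by
    rw [List.length_zip, PySem.List.length_pyRange_one]; omega
  refine List.mem_iff_getElem.mpr ⟨k, hklen, ?_⟩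
  rw [pv_zip_getElem price k hklen, hpk]

-- monotone chain: if snd decreases from u to v, some adjacent step decreases
lemma pv_chain (f : Nat → Int) (u v : Nat) (huv : u < v) (hlt : f v < f u) :
    ∃ k, u ≤ k ∧ k < v ∧ f (k+1) < f k := by
  by_contra hcon
  push_neg at hcon
  have mono : ∀ d : Nat, u + d ≤ v → f u ≤ f (u + d) := by
    intro d
    induction d with
    | zero => intro _; simp
    | succ d ihd =>
      intro hd
      have h1 := ihd (by omega)
      have h2 := hcon (u + d) (by omega) (by omega)
      have he : u + (d + 1) = (u + d) + 1 := by omega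
      rw [he]; omega
  have h3 := mono (v - u) (by omega)
  have h4 : u + (v - u) = v := by omega
  rw [h4] at h3
  omega

-- ----- the two comparison directions -----
lemma pv_dir1 (price : List Int) :
    ∀ v ∈ pvPairs (pvPwi price), ∃ w ∈ pvCands price, w ≤ v := by
  intro v hv
  rcases (pv_mem_pairs (pvPwi price) v).mp hv with ⟨k, a, b, ha, hb, hba, rfl⟩
  have hk : k < (pvPwi price).length := (List.getElem?_eq_some_iff.mp ha).1
  have hk1 : k + 1 < (pvPwi price).length := (List.getElem?_eq_some_iff.mp hb).1
  have hak : (pvPwi price)[k] = a := (List.getElem?_eq_some_iff.mp ha).2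
  have hbk : (pvPwi price)[k+1] = b := (List.getElem?_eq_some_iff.mp hb).2
  have hstable : (pvPwi price).Pairwise pvLex :=
    pv_sorted_stable _ (pv_zip_snd_pairwise price)
  have hlex : pvLex a b := by
    have := List.pairwise_iff_getElem.mp hstable k (k+1) hk hk1 (by omega)
    rwa [hak, hbk] at this
  have hab : a.1 < b.1 := by
    rcases hlex with h | ⟨_, h2⟩
    · exact h
    · omega
  have hperm := PySem.List.sorted_perm (price.zip (PySem.List.pyRange 0 (price.length : Int) 1)) (fun x : Int × Int => x.1) false
  have hma : a ∈ price.zip (PySem.List.pyRange 0 (price.length : Int) 1) :=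
    hperm.mem_iff.mp (List.mem_of_getElem? ha)
  have hmb : b ∈ price.zip (PySem.List.pyRange 0 (price.length : Int) 1) :=
    hperm.mem_iff.mp (List.mem_of_getElem? hb)
  rcases pv_mem_zip price a hma with ⟨ka, hpa, hia⟩
  rcases pv_mem_zip price b hmb with ⟨kb, hpb, hib⟩
  have hkba : kb < ka := by
    rw [hia, hib] at hba; exact_mod_cast hba
  refine ⟨b.1 - a.1, ?_, le_refl _⟩
  exact (pv_mem_cands price _).mpr ⟨kb, ka, hkba, b.1, a.1, hpb, hpa, hab, rfl⟩

lemma pv_dir2 (price : List Int) :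
    ∀ w ∈ pvCands price, ∃ v ∈ pvPairs (pvPwi price), v ≤ w := by
  intro w hw
  rcases (pv_mem_cands price w).mp hw with ⟨i, j, hij, p, q, hpi, hqj, hqp, rfl⟩
  -- (q, j) and (p, i) are members of the sorted list
  have hmx : (q, (j : Int)) ∈ pvPwi price :=
    ((PySem.List.sorted_perm _ (fun x : Int × Int => x.1) false).mem_iff).mpr (pv_zip_mem price j q hqj)
  have hmy : (p, (i : Int)) ∈ pvPwi price :=
    ((PySem.List.sorted_perm _ (fun x : Int × Int => x.1) false).mem_iff).mpr (pv_zip_mem price i p hpi)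
  rcases List.mem_iff_getElem.mp hmx with ⟨u, hu, hSu⟩
  rcases List.mem_iff_getElem.mp hmy with ⟨v', hv', hSv'⟩
  have hsorted : (pvPwi price).Pairwise (fun a b : Int × Int => a.1 ≤ b.1) :=
    PySem.List.sorted_pairwise _ _
  have huv : u < v' := by
    by_contra hcon
    push_neg at hcon
    rcases lt_or_eq_of_le hcon with hlt | heq
    · have := List.pairwise_iff_getElem.mp hsorted v' u hv' hu hlt
      rw [hSu, hSv'] at this
      simp at this; omega
    · subst heq
      rw [hSu] at hSv'
      have : q = p := congrArg Prod.fst hSv'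
      omega
  -- snd decreases from u to v', so some adjacent step decreases
  have hf : ∃ k, u ≤ k ∧ k < v' ∧
      (fun k => if h : k < (pvPwi price).length then (pvPwi price)[k].2 else 0) (k+1)
        < (fun k => if h : k < (pvPwi price).length then (pvPwi price)[k].2 else 0) k := by
    apply pv_chain _ u v' huv
    simp only [dif_pos hu, dif_pos hv', hSu, hSv']
    exact_mod_cast hij
  rcases hf with ⟨k, huk, hkv, hdesc⟩
  have hk : k < (pvPwi price).length := by omega
  have hk1 : k + 1 < (pvPwi price).length := by omega
  simp only [dif_pos hk, dif_pos hk1] at hdesc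
  refine ⟨(pvPwi price)[k+1].1 - (pvPwi price)[k].1, ?_, ?_⟩
  · exact (pv_mem_pairs _ _).mpr ⟨k, (pvPwi price)[k], (pvPwi price)[k+1],
      List.getElem?_eq_getElem hk, List.getElem?_eq_getElem hk1, hdesc, rfl⟩
  · have h1 : (pvPwi price)[u].1 ≤ (pvPwi price)[k].1 := by
      have := PySem.List.key_sorted_getElem_mono
        (price.zip (PySem.List.pyRange 0 (price.length : Int) 1)) (fun x : Int × Int => x.1) huk hk
      exact this
    have h2 : (pvPwi price)[k+1].1 ≤ (pvPwi price)[v'].1 := by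
      have := PySem.List.key_sorted_getElem_mono
        (price.zip (PySem.List.pyRange 0 (price.length : Int) 1)) (fun x : Int × Int => x.1) (by omega : k + 1 ≤ v') hv'
      exact this
    rw [hSu] at h1
    rw [hSv'] at h2
    simp only at h1 h2
    omega

lemma pv_main (price : List Int) : minimumLoss price = minimumLoss_alt price := by
  rw [pv_A_eq, minimumLoss_alt, pv_altLoop_eq]
  exact pv_foldl_min_eq _ _ _ (pv_dir1 price) (pv_dir2 price)

-- ===== VERDICT (by name: the statement is the Claim_ definition above) =====
theorem minimumLoss_spec : Claim_equal_minimumLoss := by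
  intro price _
  unfold Spec_minimumLoss
  exact pv_main price
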